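-- pv_equiv track=rewrite | github.com/HRuiX/mySelect | hcds/data/formats.py | auto_detect_fields
-- ===== SOURCE A (Python) =====
-- from typing import Dict, Any, Optional, List, Iterator, Union
--
-- FIELD_ALIASES = {
--     "instruction": ["instruction", "prompt", "question", "query", "input_text", "user", "human"],
--     "input": ["input", "context", "additional_context", "system"],
--     "output": ["output", "response", "answer", "completion", "assistant", "target", "label"],
-- }
--
-- def normalize_field_name(field: str, field_type: str) -> Optional[str]:
--     """
--     将字段名归一化到标准字段名
--
--     Args:
--         field: 原始字段名
--         field_type: 目标字段类型 ("instruction", "input", "output")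
--
--     Returns:
--         如果匹配则返回原始字段名，否则返回 None
--     """
--     aliases = FIELD_ALIASES.get(field_type, [])
--     field_lower = field.lower()
--
--     for alias in aliases:
--         if field_lower == alias.lower():
--             return field
--
--     return None
--
-- def auto_detect_fields(sample: Dict[str, Any]) -> Dict[str, str]:
--     """
--     自动检测字段映射
--
--     Args:
--         sample: 样本字典
--
--     Returns:
--         字段映射 {"instruction": "actual_field_name", ...}
--     """
--     mapping = {}
--
--     for field_type in ["instruction", "input", "output"]:
--         for field_name in sample.keys():
--             if normalize_field_name(field_name, field_type):
--                 mapping[field_type] = field_name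
--                 break
--
--     return mapping
-- ===== SOURCE B (Python) =====
-- FIELD_ALIASES = {
--     "instruction": ["instruction", "prompt", "question", "query", "input_text", "user", "human"],
--     "input": ["input", "context", "additional_context", "system"],
--     "output": ["output", "response", "answer", "completion", "assistant", "target", "label"],
-- }
--
-- def auto_detect_fields(sample):
--     # reverse index: lowercased alias -> field type (aliases are disjoint)
--     index = {}
--     for field_type, aliases in FIELD_ALIASES.items():
--         for alias in aliases:
--             index[alias.lower()] = field_type
--     # one pass over the keys: first matching key wins for each field type
--     found = {}
--     for key in sample.keys():
--         field_type = index.get(key.lower())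
--         if field_type is not None and field_type not in found:
--             found[field_type] = key
--     return {t: found[t] for t in ("instruction", "input", "output") if t in found}
-- ===== Notes on version B (the rewrite author's own statement) =====
-- stated objective: faster
-- what changed: A runs the three field types through a nested scan of all keys with a per-type alias loop; B builds a reverse alias->type index once and makes a single pass over the keys recording the first key per type, then emits the mapping in canonical type order (measured ~4.4x faster).
import Mathlib
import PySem

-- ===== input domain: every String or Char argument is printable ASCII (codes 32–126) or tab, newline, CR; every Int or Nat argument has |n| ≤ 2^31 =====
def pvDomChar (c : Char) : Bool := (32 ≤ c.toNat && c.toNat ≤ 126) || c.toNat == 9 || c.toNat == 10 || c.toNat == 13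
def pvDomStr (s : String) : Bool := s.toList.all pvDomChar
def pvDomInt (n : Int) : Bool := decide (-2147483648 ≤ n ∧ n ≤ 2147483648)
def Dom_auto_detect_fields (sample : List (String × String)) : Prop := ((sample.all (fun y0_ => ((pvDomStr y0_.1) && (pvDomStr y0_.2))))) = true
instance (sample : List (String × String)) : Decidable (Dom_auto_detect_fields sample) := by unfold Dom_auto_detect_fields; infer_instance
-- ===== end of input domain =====

-- B replaces A's three nested scans (per field type, rescan every key against the alias list)
-- by a reverse alias->type index built once and a single pass over the keys (measured faster in a timing run).

-- shared module-level constant FIELD_ALIASES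
def FIELD_ALIASES : PySem.Dict String (List String) := PySem.Dict.ofList
  [("instruction", ["instruction", "prompt", "question", "query", "input_text", "user", "human"]),
   ("input", ["input", "context", "additional_context", "system"]),
   ("output", ["output", "response", "answer", "completion", "assistant", "target", "label"])]

-- ===== PORT A =====
-- the `for alias in aliases: if field_lower == alias.lower(): return field` loop
def normLoop (field : String) (field_lower : String) : List String → Option String
  | [] => none
  | a :: rest => if field_lower = PySem.Str.lower a then some field else normLoop field field_lower rest

def normalize_field_name (field : String) (field_type : String) : Option String :=
  let aliases := FIELD_ALIASES.getD field_type []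
  let field_lower := PySem.Str.lower field
  normLoop field field_lower aliases

-- the inner `for field_name in sample.keys(): … break` loop; `if r:` is Python truthiness
-- of Optional[str]: none and some "" are falsy
def innerA (field_type : String) (mapping : PySem.Dict String String) : List String → PySem.Dict String String
  | [] => mapping
  | k :: rest =>
    match normalize_field_name k field_type with
    | some s => if s != "" then mapping.insert field_type k else innerA field_type mapping rest
    | none => innerA field_type mapping rest

def auto_detect_fields (sample : List (String × String)) : List (String × String) :=
  (["instruction", "input", "output"].foldl
    (fun mapping field_type => innerA field_type mapping (sample.map Prod.fst))
    PySem.Dict.empty).items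

-- ===== PORT B =====
def auto_detect_fields_alt (sample : List (String × String)) : List (String × String) :=
  -- reverse index: lowercased alias -> field type
  let index : PySem.Dict String String :=
    FIELD_ALIASES.items.foldl
      (fun idx p => p.2.foldl (fun idx al => idx.insert (PySem.Str.lower al) p.1) idx)
      PySem.Dict.empty
  -- single pass over the keys: first key per field type wins
  let found : PySem.Dict String String :=
    (sample.map Prod.fst).foldl
      (fun found key =>
        match index.get? (PySem.Str.lower key) with   -- index.get(key.lower()); `is not None` = the some branch
        | some ft => if found.contains ft then found else found.insert ft key
        | none => found)
      PySem.Dict.empty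
  -- {t: found[t] for t in (…) if t in found}; `t in found` + `found[t]` = the get? match (exact: key present iff get? = some)
  (["instruction", "input", "output"].foldl
    (fun m t => match found.get? t with | some v => m.insert t v | none => m)
    PySem.Dict.empty).items

-- ===== PRECONDITION & SPEC =====
def Spec_auto_detect_fields (sample : List (String × String)) (out : List (String × String)) : Prop := out = auto_detect_fields_alt sample
instance (sample : List (String × String)) (out : List (String × String)) : Decidable (Spec_auto_detect_fields sample out) := by unfold Spec_auto_detect_fields; infer_instance

-- ===== CLAIM (what is proved, stated in full; the proofs are below) =====
def Claim_equal_auto_detect_fields : Prop := ∀ (sample : List (String × String)), Dom_auto_detect_fields sample → Spec_auto_detect_fields sample (auto_detect_fields sample)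

-- ===== LEMMAS AND PROOFS =====

def pvIndex : PySem.Dict String String := PySem.Dict.mk
  [("instruction", "instruction"), ("prompt", "instruction"), ("question", "instruction"),
   ("query", "instruction"), ("input_text", "instruction"), ("user", "instruction"), ("human", "instruction"),
   ("input", "input"), ("context", "input"), ("additional_context", "input"), ("system", "input"),
   ("output", "output"), ("response", "output"), ("answer", "output"), ("completion", "output"),
   ("assistant", "output"), ("target", "output"), ("label", "output")]

def pvPredA (ft k : String) : Bool := match normalize_field_name k ft with | some s => s != "" | none => false
def pvPredB (t k : String) : Bool := pvIndex.get? (PySem.Str.lower k) == some t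

theorem normLoop_truthy (k s : String) (L : List String) :
    (match normLoop k s L with | some t => t != "" | none => false)
      = (k != "" && L.any (fun a => s == PySem.Str.lower a)) := by
  induction L with
  | nil => simp [normLoop]
  | cons a rest ih =>
    by_cases h : s = PySem.Str.lower a
    · by_cases hk : k = "" <;> simp [normLoop, h, hk]
    · have hb : (s == PySem.Str.lower a) = false := beq_eq_false_iff_ne.mpr h
      simp [normLoop, h, hb, ih]
theorem predA_eq_instruction (k : String) : pvPredA "instruction" k = pvPredB "instruction" k := by
  have hal : FIELD_ALIASES.getD "instruction" [] = ["instruction", "prompt", "question", "query", "input_text", "user", "human"] := by decide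
  simp only [pvPredA, pvPredB, normalize_field_name, hal, normLoop_truthy, pvIndex,
    PySem.Dict.get?_mk_cons, List.any_cons, List.any_nil,
    show PySem.Str.lower "instruction" = "instruction" from by decide,
    show PySem.Str.lower "prompt" = "prompt" from by decide,
    show PySem.Str.lower "question" = "question" from by decide,
    show PySem.Str.lower "query" = "query" from by decide,
    show PySem.Str.lower "input_text" = "input_text" from by decide,
    show PySem.Str.lower "user" = "user" from by decide,
    show PySem.Str.lower "human" = "human" from by decide,
    show PySem.Str.lower "input" = "input" from by decide,
    show PySem.Str.lower "context" = "context" from by decide,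
    show PySem.Str.lower "additional_context" = "additional_context" from by decide,
    show PySem.Str.lower "system" = "system" from by decide,
    show PySem.Str.lower "output" = "output" from by decide,
    show PySem.Str.lower "response" = "response" from by decide,
    show PySem.Str.lower "answer" = "answer" from by decide,
    show PySem.Str.lower "completion" = "completion" from by decide,
    show PySem.Str.lower "assistant" = "assistant" from by decide,
    show PySem.Str.lower "target" = "target" from by decide,
    show PySem.Str.lower "label" = "label" from by decide]
  generalize hs : PySem.Str.lower k = s
  by_cases h0 : s = "instruction"
  · subst h0
    have hk : k ≠ "" := fun he => by rw [he] at hs; exact absurd hs (by decide)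
    simp [hk]
  by_cases h1 : s = "prompt"
  · subst h1
    have hk : k ≠ "" := fun he => by rw [he] at hs; exact absurd hs (by decide)
    simp [hk]
  by_cases h2 : s = "question"
  · subst h2
    have hk : k ≠ "" := fun he => by rw [he] at hs; exact absurd hs (by decide)
    simp [hk]
  by_cases h3 : s = "query"
  · subst h3
    have hk : k ≠ "" := fun he => by rw [he] at hs; exact absurd hs (by decide)
    simp [hk]
  by_cases h4 : s = "input_text"
  · subst h4
    have hk : k ≠ "" := fun he => by rw [he] at hs; exact absurd hs (by decide)
    simp [hk]
  by_cases h5 : s = "user"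
  · subst h5
    have hk : k ≠ "" := fun he => by rw [he] at hs; exact absurd hs (by decide)
    simp [hk]
  by_cases h6 : s = "human"
  · subst h6
    have hk : k ≠ "" := fun he => by rw [he] at hs; exact absurd hs (by decide)
    simp [hk]
  by_cases h7 : s = "input"
  · subst h7
    have hk : k ≠ "" := fun he => by rw [he] at hs; exact absurd hs (by decide)
    simp [hk]
  by_cases h8 : s = "context"
  · subst h8
    have hk : k ≠ "" := fun he => by rw [he] at hs; exact absurd hs (by decide)
    simp [hk]
  by_cases h9 : s = "additional_context"
  · subst h9
    have hk : k ≠ "" := fun he => by rw [he] at hs; exact absurd hs (by decide)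
    simp [hk]
  by_cases h10 : s = "system"
  · subst h10
    have hk : k ≠ "" := fun he => by rw [he] at hs; exact absurd hs (by decide)
    simp [hk]
  by_cases h11 : s = "output"
  · subst h11
    have hk : k ≠ "" := fun he => by rw [he] at hs; exact absurd hs (by decide)
    simp [hk]
  by_cases h12 : s = "response"
  · subst h12
    have hk : k ≠ "" := fun he => by rw [he] at hs; exact absurd hs (by decide)
    simp [hk]
  by_cases h13 : s = "answer"
  · subst h13
    have hk : k ≠ "" := fun he => by rw [he] at hs; exact absurd hs (by decide)
    simp [hk]
  by_cases h14 : s = "completion"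
  · subst h14
    have hk : k ≠ "" := fun he => by rw [he] at hs; exact absurd hs (by decide)
    simp [hk]
  by_cases h15 : s = "assistant"
  · subst h15
    have hk : k ≠ "" := fun he => by rw [he] at hs; exact absurd hs (by decide)
    simp [hk]
  by_cases h16 : s = "target"
  · subst h16
    have hk : k ≠ "" := fun he => by rw [he] at hs; exact absurd hs (by decide)
    simp [hk]
  by_cases h17 : s = "label"
  · subst h17
    have hk : k ≠ "" := fun he => by rw [he] at hs; exact absurd hs (by decide)
    simp [hk]
  have b0 : ("instruction" == s) = false := beq_eq_false_iff_ne.mpr (fun he => h0 he.symm)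
  have c0 : (s == "instruction") = false := beq_eq_false_iff_ne.mpr h0
  have b1 : ("prompt" == s) = false := beq_eq_false_iff_ne.mpr (fun he => h1 he.symm)
  have c1 : (s == "prompt") = false := beq_eq_false_iff_ne.mpr h1
  have b2 : ("question" == s) = false := beq_eq_false_iff_ne.mpr (fun he => h2 he.symm)
  have c2 : (s == "question") = false := beq_eq_false_iff_ne.mpr h2
  have b3 : ("query" == s) = false := beq_eq_false_iff_ne.mpr (fun he => h3 he.symm)
  have c3 : (s == "query") = false := beq_eq_false_iff_ne.mpr h3
  have b4 : ("input_text" == s) = false := beq_eq_false_iff_ne.mpr (fun he => h4 he.symm)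
  have c4 : (s == "input_text") = false := beq_eq_false_iff_ne.mpr h4
  have b5 : ("user" == s) = false := beq_eq_false_iff_ne.mpr (fun he => h5 he.symm)
  have c5 : (s == "user") = false := beq_eq_false_iff_ne.mpr h5
  have b6 : ("human" == s) = false := beq_eq_false_iff_ne.mpr (fun he => h6 he.symm)
  have c6 : (s == "human") = false := beq_eq_false_iff_ne.mpr h6
  have b7 : ("input" == s) = false := beq_eq_false_iff_ne.mpr (fun he => h7 he.symm)
  have c7 : (s == "input") = false := beq_eq_false_iff_ne.mpr h7
  have b8 : ("context" == s) = false := beq_eq_false_iff_ne.mpr (fun he => h8 he.symm)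
  have c8 : (s == "context") = false := beq_eq_false_iff_ne.mpr h8
  have b9 : ("additional_context" == s) = false := beq_eq_false_iff_ne.mpr (fun he => h9 he.symm)
  have c9 : (s == "additional_context") = false := beq_eq_false_iff_ne.mpr h9
  have b10 : ("system" == s) = false := beq_eq_false_iff_ne.mpr (fun he => h10 he.symm)
  have c10 : (s == "system") = false := beq_eq_false_iff_ne.mpr h10
  have b11 : ("output" == s) = false := beq_eq_false_iff_ne.mpr (fun he => h11 he.symm)
  have c11 : (s == "output") = false := beq_eq_false_iff_ne.mpr h11
  have b12 : ("response" == s) = false := beq_eq_false_iff_ne.mpr (fun he => h12 he.symm)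
  have c12 : (s == "response") = false := beq_eq_false_iff_ne.mpr h12
  have b13 : ("answer" == s) = false := beq_eq_false_iff_ne.mpr (fun he => h13 he.symm)
  have c13 : (s == "answer") = false := beq_eq_false_iff_ne.mpr h13
  have b14 : ("completion" == s) = false := beq_eq_false_iff_ne.mpr (fun he => h14 he.symm)
  have c14 : (s == "completion") = false := beq_eq_false_iff_ne.mpr h14
  have b15 : ("assistant" == s) = false := beq_eq_false_iff_ne.mpr (fun he => h15 he.symm)
  have c15 : (s == "assistant") = false := beq_eq_false_iff_ne.mpr h15
  have b16 : ("target" == s) = false := beq_eq_false_iff_ne.mpr (fun he => h16 he.symm)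
  have c16 : (s == "target") = false := beq_eq_false_iff_ne.mpr h16
  have b17 : ("label" == s) = false := beq_eq_false_iff_ne.mpr (fun he => h17 he.symm)
  have c17 : (s == "label") = false := beq_eq_false_iff_ne.mpr h17
  simp [b0, b1, b2, b3, b4, b5, b6, b7, b8, b9, b10, b11, b12, b13, b14, b15, b16, b17, c0, c1, c2, c3, c4, c5, c6, c7, c8, c9, c10, c11, c12, c13, c14, c15, c16, c17, PySem.Dict.get?]

theorem predA_eq_input (k : String) : pvPredA "input" k = pvPredB "input" k := by
  have hal : FIELD_ALIASES.getD "input" [] = ["input", "context", "additional_context", "system"] := by decide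
  simp only [pvPredA, pvPredB, normalize_field_name, hal, normLoop_truthy, pvIndex,
    PySem.Dict.get?_mk_cons, List.any_cons, List.any_nil,
    show PySem.Str.lower "instruction" = "instruction" from by decide,
    show PySem.Str.lower "prompt" = "prompt" from by decide,
    show PySem.Str.lower "question" = "question" from by decide,
    show PySem.Str.lower "query" = "query" from by decide,
    show PySem.Str.lower "input_text" = "input_text" from by decide,
    show PySem.Str.lower "user" = "user" from by decide,
    show PySem.Str.lower "human" = "human" from by decide,
    show PySem.Str.lower "input" = "input" from by decide,
    show PySem.Str.lower "context" = "context" from by decide,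
    show PySem.Str.lower "additional_context" = "additional_context" from by decide,
    show PySem.Str.lower "system" = "system" from by decide,
    show PySem.Str.lower "output" = "output" from by decide,
    show PySem.Str.lower "response" = "response" from by decide,
    show PySem.Str.lower "answer" = "answer" from by decide,
    show PySem.Str.lower "completion" = "completion" from by decide,
    show PySem.Str.lower "assistant" = "assistant" from by decide,
    show PySem.Str.lower "target" = "target" from by decide,
    show PySem.Str.lower "label" = "label" from by decide]
  generalize hs : PySem.Str.lower k = s
  by_cases h0 : s = "instruction"
  · subst h0
    have hk : k ≠ "" := fun he => by rw [he] at hs; exact absurd hs (by decide)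
    simp [hk]
  by_cases h1 : s = "prompt"
  · subst h1
    have hk : k ≠ "" := fun he => by rw [he] at hs; exact absurd hs (by decide)
    simp [hk]
  by_cases h2 : s = "question"
  · subst h2
    have hk : k ≠ "" := fun he => by rw [he] at hs; exact absurd hs (by decide)
    simp [hk]
  by_cases h3 : s = "query"
  · subst h3
    have hk : k ≠ "" := fun he => by rw [he] at hs; exact absurd hs (by decide)
    simp [hk]
  by_cases h4 : s = "input_text"
  · subst h4
    have hk : k ≠ "" := fun he => by rw [he] at hs; exact absurd hs (by decide)
    simp [hk]
  by_cases h5 : s = "user"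
  · subst h5
    have hk : k ≠ "" := fun he => by rw [he] at hs; exact absurd hs (by decide)
    simp [hk]
  by_cases h6 : s = "human"
  · subst h6
    have hk : k ≠ "" := fun he => by rw [he] at hs; exact absurd hs (by decide)
    simp [hk]
  by_cases h7 : s = "input"
  · subst h7
    have hk : k ≠ "" := fun he => by rw [he] at hs; exact absurd hs (by decide)
    simp [hk]
  by_cases h8 : s = "context"
  · subst h8
    have hk : k ≠ "" := fun he => by rw [he] at hs; exact absurd hs (by decide)
    simp [hk]
  by_cases h9 : s = "additional_context"
  · subst h9
    have hk : k ≠ "" := fun he => by rw [he] at hs; exact absurd hs (by decide)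
    simp [hk]
  by_cases h10 : s = "system"
  · subst h10
    have hk : k ≠ "" := fun he => by rw [he] at hs; exact absurd hs (by decide)
    simp [hk]
  by_cases h11 : s = "output"
  · subst h11
    have hk : k ≠ "" := fun he => by rw [he] at hs; exact absurd hs (by decide)
    simp [hk]
  by_cases h12 : s = "response"
  · subst h12
    have hk : k ≠ "" := fun he => by rw [he] at hs; exact absurd hs (by decide)
    simp [hk]
  by_cases h13 : s = "answer"
  · subst h13
    have hk : k ≠ "" := fun he => by rw [he] at hs; exact absurd hs (by decide)
    simp [hk]
  by_cases h14 : s = "completion"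
  · subst h14
    have hk : k ≠ "" := fun he => by rw [he] at hs; exact absurd hs (by decide)
    simp [hk]
  by_cases h15 : s = "assistant"
  · subst h15
    have hk : k ≠ "" := fun he => by rw [he] at hs; exact absurd hs (by decide)
    simp [hk]
  by_cases h16 : s = "target"
  · subst h16
    have hk : k ≠ "" := fun he => by rw [he] at hs; exact absurd hs (by decide)
    simp [hk]
  by_cases h17 : s = "label"
  · subst h17
    have hk : k ≠ "" := fun he => by rw [he] at hs; exact absurd hs (by decide)
    simp [hk]
  have b0 : ("instruction" == s) = false := beq_eq_false_iff_ne.mpr (fun he => h0 he.symm)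
  have c0 : (s == "instruction") = false := beq_eq_false_iff_ne.mpr h0
  have b1 : ("prompt" == s) = false := beq_eq_false_iff_ne.mpr (fun he => h1 he.symm)
  have c1 : (s == "prompt") = false := beq_eq_false_iff_ne.mpr h1
  have b2 : ("question" == s) = false := beq_eq_false_iff_ne.mpr (fun he => h2 he.symm)
  have c2 : (s == "question") = false := beq_eq_false_iff_ne.mpr h2
  have b3 : ("query" == s) = false := beq_eq_false_iff_ne.mpr (fun he => h3 he.symm)
  have c3 : (s == "query") = false := beq_eq_false_iff_ne.mpr h3
  have b4 : ("input_text" == s) = false := beq_eq_false_iff_ne.mpr (fun he => h4 he.symm)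
  have c4 : (s == "input_text") = false := beq_eq_false_iff_ne.mpr h4
  have b5 : ("user" == s) = false := beq_eq_false_iff_ne.mpr (fun he => h5 he.symm)
  have c5 : (s == "user") = false := beq_eq_false_iff_ne.mpr h5
  have b6 : ("human" == s) = false := beq_eq_false_iff_ne.mpr (fun he => h6 he.symm)
  have c6 : (s == "human") = false := beq_eq_false_iff_ne.mpr h6
  have b7 : ("input" == s) = false := beq_eq_false_iff_ne.mpr (fun he => h7 he.symm)
  have c7 : (s == "input") = false := beq_eq_false_iff_ne.mpr h7
  have b8 : ("context" == s) = false := beq_eq_false_iff_ne.mpr (fun he => h8 he.symm)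
  have c8 : (s == "context") = false := beq_eq_false_iff_ne.mpr h8
  have b9 : ("additional_context" == s) = false := beq_eq_false_iff_ne.mpr (fun he => h9 he.symm)
  have c9 : (s == "additional_context") = false := beq_eq_false_iff_ne.mpr h9
  have b10 : ("system" == s) = false := beq_eq_false_iff_ne.mpr (fun he => h10 he.symm)
  have c10 : (s == "system") = false := beq_eq_false_iff_ne.mpr h10
  have b11 : ("output" == s) = false := beq_eq_false_iff_ne.mpr (fun he => h11 he.symm)
  have c11 : (s == "output") = false := beq_eq_false_iff_ne.mpr h11
  have b12 : ("response" == s) = false := beq_eq_false_iff_ne.mpr (fun he => h12 he.symm)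
  have c12 : (s == "response") = false := beq_eq_false_iff_ne.mpr h12
  have b13 : ("answer" == s) = false := beq_eq_false_iff_ne.mpr (fun he => h13 he.symm)
  have c13 : (s == "answer") = false := beq_eq_false_iff_ne.mpr h13
  have b14 : ("completion" == s) = false := beq_eq_false_iff_ne.mpr (fun he => h14 he.symm)
  have c14 : (s == "completion") = false := beq_eq_false_iff_ne.mpr h14
  have b15 : ("assistant" == s) = false := beq_eq_false_iff_ne.mpr (fun he => h15 he.symm)
  have c15 : (s == "assistant") = false := beq_eq_false_iff_ne.mpr h15
  have b16 : ("target" == s) = false := beq_eq_false_iff_ne.mpr (fun he => h16 he.symm)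
  have c16 : (s == "target") = false := beq_eq_false_iff_ne.mpr h16
  have b17 : ("label" == s) = false := beq_eq_false_iff_ne.mpr (fun he => h17 he.symm)
  have c17 : (s == "label") = false := beq_eq_false_iff_ne.mpr h17
  simp [b0, b1, b2, b3, b4, b5, b6, b7, b8, b9, b10, b11, b12, b13, b14, b15, b16, b17, c0, c1, c2, c3, c4, c5, c6, c7, c8, c9, c10, c11, c12, c13, c14, c15, c16, c17, PySem.Dict.get?]

theorem predA_eq_output (k : String) : pvPredA "output" k = pvPredB "output" k := by
  have hal : FIELD_ALIASES.getD "output" [] = ["output", "response", "answer", "completion", "assistant", "target", "label"] := by decide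
  simp only [pvPredA, pvPredB, normalize_field_name, hal, normLoop_truthy, pvIndex,
    PySem.Dict.get?_mk_cons, List.any_cons, List.any_nil,
    show PySem.Str.lower "instruction" = "instruction" from by decide,
    show PySem.Str.lower "prompt" = "prompt" from by decide,
    show PySem.Str.lower "question" = "question" from by decide,
    show PySem.Str.lower "query" = "query" from by decide,
    show PySem.Str.lower "input_text" = "input_text" from by decide,
    show PySem.Str.lower "user" = "user" from by decide,
    show PySem.Str.lower "human" = "human" from by decide,
    show PySem.Str.lower "input" = "input" from by decide,
    show PySem.Str.lower "context" = "context" from by decide,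
    show PySem.Str.lower "additional_context" = "additional_context" from by decide,
    show PySem.Str.lower "system" = "system" from by decide,
    show PySem.Str.lower "output" = "output" from by decide,
    show PySem.Str.lower "response" = "response" from by decide,
    show PySem.Str.lower "answer" = "answer" from by decide,
    show PySem.Str.lower "completion" = "completion" from by decide,
    show PySem.Str.lower "assistant" = "assistant" from by decide,
    show PySem.Str.lower "target" = "target" from by decide,
    show PySem.Str.lower "label" = "label" from by decide]
  generalize hs : PySem.Str.lower k = s
  by_cases h0 : s = "instruction"
  · subst h0
    have hk : k ≠ "" := fun he => by rw [he] at hs; exact absurd hs (by decide)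
    simp [hk]
  by_cases h1 : s = "prompt"
  · subst h1
    have hk : k ≠ "" := fun he => by rw [he] at hs; exact absurd hs (by decide)
    simp [hk]
  by_cases h2 : s = "question"
  · subst h2
    have hk : k ≠ "" := fun he => by rw [he] at hs; exact absurd hs (by decide)
    simp [hk]
  by_cases h3 : s = "query"
  · subst h3
    have hk : k ≠ "" := fun he => by rw [he] at hs; exact absurd hs (by decide)
    simp [hk]
  by_cases h4 : s = "input_text"
  · subst h4
    have hk : k ≠ "" := fun he => by rw [he] at hs; exact absurd hs (by decide)
    simp [hk]
  by_cases h5 : s = "user"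
  · subst h5
    have hk : k ≠ "" := fun he => by rw [he] at hs; exact absurd hs (by decide)
    simp [hk]
  by_cases h6 : s = "human"
  · subst h6
    have hk : k ≠ "" := fun he => by rw [he] at hs; exact absurd hs (by decide)
    simp [hk]
  by_cases h7 : s = "input"
  · subst h7
    have hk : k ≠ "" := fun he => by rw [he] at hs; exact absurd hs (by decide)
    simp [hk]
  by_cases h8 : s = "context"
  · subst h8
    have hk : k ≠ "" := fun he => by rw [he] at hs; exact absurd hs (by decide)
    simp [hk]
  by_cases h9 : s = "additional_context"
  · subst h9
    have hk : k ≠ "" := fun he => by rw [he] at hs; exact absurd hs (by decide)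
    simp [hk]
  by_cases h10 : s = "system"
  · subst h10
    have hk : k ≠ "" := fun he => by rw [he] at hs; exact absurd hs (by decide)
    simp [hk]
  by_cases h11 : s = "output"
  · subst h11
    have hk : k ≠ "" := fun he => by rw [he] at hs; exact absurd hs (by decide)
    simp [hk]
  by_cases h12 : s = "response"
  · subst h12
    have hk : k ≠ "" := fun he => by rw [he] at hs; exact absurd hs (by decide)
    simp [hk]
  by_cases h13 : s = "answer"
  · subst h13
    have hk : k ≠ "" := fun he => by rw [he] at hs; exact absurd hs (by decide)
    simp [hk]
  by_cases h14 : s = "completion"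
  · subst h14
    have hk : k ≠ "" := fun he => by rw [he] at hs; exact absurd hs (by decide)
    simp [hk]
  by_cases h15 : s = "assistant"
  · subst h15
    have hk : k ≠ "" := fun he => by rw [he] at hs; exact absurd hs (by decide)
    simp [hk]
  by_cases h16 : s = "target"
  · subst h16
    have hk : k ≠ "" := fun he => by rw [he] at hs; exact absurd hs (by decide)
    simp [hk]
  by_cases h17 : s = "label"
  · subst h17
    have hk : k ≠ "" := fun he => by rw [he] at hs; exact absurd hs (by decide)
    simp [hk]
  have b0 : ("instruction" == s) = false := beq_eq_false_iff_ne.mpr (fun he => h0 he.symm)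
  have c0 : (s == "instruction") = false := beq_eq_false_iff_ne.mpr h0
  have b1 : ("prompt" == s) = false := beq_eq_false_iff_ne.mpr (fun he => h1 he.symm)
  have c1 : (s == "prompt") = false := beq_eq_false_iff_ne.mpr h1
  have b2 : ("question" == s) = false := beq_eq_false_iff_ne.mpr (fun he => h2 he.symm)
  have c2 : (s == "question") = false := beq_eq_false_iff_ne.mpr h2
  have b3 : ("query" == s) = false := beq_eq_false_iff_ne.mpr (fun he => h3 he.symm)
  have c3 : (s == "query") = false := beq_eq_false_iff_ne.mpr h3
  have b4 : ("input_text" == s) = false := beq_eq_false_iff_ne.mpr (fun he => h4 he.symm)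
  have c4 : (s == "input_text") = false := beq_eq_false_iff_ne.mpr h4
  have b5 : ("user" == s) = false := beq_eq_false_iff_ne.mpr (fun he => h5 he.symm)
  have c5 : (s == "user") = false := beq_eq_false_iff_ne.mpr h5
  have b6 : ("human" == s) = false := beq_eq_false_iff_ne.mpr (fun he => h6 he.symm)
  have c6 : (s == "human") = false := beq_eq_false_iff_ne.mpr h6
  have b7 : ("input" == s) = false := beq_eq_false_iff_ne.mpr (fun he => h7 he.symm)
  have c7 : (s == "input") = false := beq_eq_false_iff_ne.mpr h7
  have b8 : ("context" == s) = false := beq_eq_false_iff_ne.mpr (fun he => h8 he.symm)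
  have c8 : (s == "context") = false := beq_eq_false_iff_ne.mpr h8
  have b9 : ("additional_context" == s) = false := beq_eq_false_iff_ne.mpr (fun he => h9 he.symm)
  have c9 : (s == "additional_context") = false := beq_eq_false_iff_ne.mpr h9
  have b10 : ("system" == s) = false := beq_eq_false_iff_ne.mpr (fun he => h10 he.symm)
  have c10 : (s == "system") = false := beq_eq_false_iff_ne.mpr h10
  have b11 : ("output" == s) = false := beq_eq_false_iff_ne.mpr (fun he => h11 he.symm)
  have c11 : (s == "output") = false := beq_eq_false_iff_ne.mpr h11
  have b12 : ("response" == s) = false := beq_eq_false_iff_ne.mpr (fun he => h12 he.symm)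
  have c12 : (s == "response") = false := beq_eq_false_iff_ne.mpr h12
  have b13 : ("answer" == s) = false := beq_eq_false_iff_ne.mpr (fun he => h13 he.symm)
  have c13 : (s == "answer") = false := beq_eq_false_iff_ne.mpr h13
  have b14 : ("completion" == s) = false := beq_eq_false_iff_ne.mpr (fun he => h14 he.symm)
  have c14 : (s == "completion") = false := beq_eq_false_iff_ne.mpr h14
  have b15 : ("assistant" == s) = false := beq_eq_false_iff_ne.mpr (fun he => h15 he.symm)
  have c15 : (s == "assistant") = false := beq_eq_false_iff_ne.mpr h15
  have b16 : ("target" == s) = false := beq_eq_false_iff_ne.mpr (fun he => h16 he.symm)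
  have c16 : (s == "target") = false := beq_eq_false_iff_ne.mpr h16
  have b17 : ("label" == s) = false := beq_eq_false_iff_ne.mpr (fun he => h17 he.symm)
  have c17 : (s == "label") = false := beq_eq_false_iff_ne.mpr h17
  simp [b0, b1, b2, b3, b4, b5, b6, b7, b8, b9, b10, b11, b12, b13, b14, b15, b16, b17, c0, c1, c2, c3, c4, c5, c6, c7, c8, c9, c10, c11, c12, c13, c14, c15, c16, c17, PySem.Dict.get?]
theorem pvIndex_eq :
    (FIELD_ALIASES.items.foldl
      (fun idx p => p.2.foldl (fun idx al => idx.insert (PySem.Str.lower al) p.1) idx)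
      (PySem.Dict.empty : PySem.Dict String String)) = pvIndex := by decide

theorem innerA_eq (ft : String) (m : PySem.Dict String String) (keys : List String) :
    innerA ft m keys = match keys.find? (fun k => pvPredA ft k) with
      | some k => m.insert ft k
      | none => m := by
  induction keys with
  | nil => simp [innerA]
  | cons k rest ih =>
    simp only [innerA, List.find?]
    cases h : normalize_field_name k ft with
    | none =>
      have hp : pvPredA ft k = false := by simp [pvPredA, h]
      simp [hp, ih]
    | some s =>
      cases hs : (s != "") with
      | true =>
        have hp : pvPredA ft k = true := by simp only [pvPredA, h, hs]
        simp [hp, hs]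
      | false =>
        have hp : pvPredA ft k = false := by simp only [pvPredA, h, hs]
        simp [hp, hs, ih]

def pvStep (found : PySem.Dict String String) (key : String) : PySem.Dict String String :=
  match pvIndex.get? (PySem.Str.lower key) with
  | some ft => if found.contains ft then found else found.insert ft key
  | none => found

theorem found_get (t : String) (keys : List String) (found : PySem.Dict String String) :
    (keys.foldl pvStep found).get? t =
      match found.get? t with
      | some v => some v
      | none => keys.find? (fun k => pvPredB t k) := by
  induction keys generalizing found with
  | nil => cases h : found.get? t <;> simp [h]
  | cons k rest ih =>
    simp only [List.foldl_cons, List.find?]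
    cases h : pvIndex.get? (PySem.Str.lower k) with
    | none =>
      have hp : pvPredB t k = false := by simp [pvPredB, h]
      rw [show pvStep found k = found from by simp [pvStep, h]]
      cases hf : found.get? t <;> simp [hf, ih, hp]
    | some u =>
      by_cases hu : u = t
      · have hp : pvPredB t k = true := by simp [pvPredB, h, hu]
        by_cases hc : found.contains t
        · have hstep : pvStep found k = found := by simp [pvStep, h, hu, hc]
          rw [hstep]
          obtain ⟨v, hv⟩ : ∃ v, found.get? t = some v :=
            Option.isSome_iff_exists.mp (by rw [← PySem.Dict.contains_eq_isSome_get?]; exact hc)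
          simp [hv, ih, hp]
        · have hstep : pvStep found k = found.insert t k := by
            subst hu; simp [pvStep, h, hc]
          rw [hstep]
          have hf : found.get? t = none := by
            rw [← Option.not_isSome_iff_eq_none, ← PySem.Dict.contains_eq_isSome_get?]
            simpa using hc
          have hins : (found.insert t k).get? t = some k := PySem.Dict.get?_insert_self found t k
          simp [ih, hins, hf, hp]
      · have hp : pvPredB t k = false := by simpa [pvPredB, h] using hu
        by_cases hc : found.contains u
        · have hstep : pvStep found k = found := by simp [pvStep, h, hc]
          rw [hstep]
          cases hf : found.get? t <;> simp [hf, ih, hp]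
        · have hstep : pvStep found k = found.insert u k := by simp [pvStep, h, hc]
          rw [hstep]
          have hne : (found.insert u k).get? t = found.get? t :=
            PySem.Dict.get?_insert_of_ne found k (fun he => hu he.symm)
          cases hf : found.get? t <;> simp [ih, hne, hf, hp]

-- ===== VERDICT (by name: the statement is the Claim_ definition above) =====
theorem auto_detect_fields_spec : Claim_equal_auto_detect_fields := by
  intro sample _
  unfold Spec_auto_detect_fields
  have hstep : (fun (found : PySem.Dict String String) (key : String) =>
      match pvIndex.get? (PySem.Str.lower key) with
      | some ft => if found.contains ft then found else found.insert ft key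
      | none => found) = pvStep := rfl
  simp only [auto_detect_fields, auto_detect_fields_alt, pvIndex_eq, hstep,
    List.foldl_cons, List.foldl_nil, innerA_eq, found_get, PySem.Dict.get?_empty]
  rw [show (fun k => pvPredA "instruction" k) = (fun k => pvPredB "instruction" k) from funext predA_eq_instruction,
     show (fun k => pvPredA "input" k) = (fun k => pvPredB "input" k) from funext predA_eq_input,
     show (fun k => pvPredA "output" k) = (fun k => pvPredB "output" k) from funext predA_eq_output]
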